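-- pv_equiv track=rewrite | github.com/stoufa/Minesweeper-Solver | combine_configurations.py | find_consistent_cells
-- ===== SOURCE A (Python) =====
-- def find_consistent_cells(boards):
--     """Find cells that are the same across all configurations."""
--     if not boards:
--         return []
--
--     # Get dimensions from first board
--     height = len(boards[0])
--     width = len(boards[0][0]) if height > 0 else 0
--
--     # Initialize result board
--     result = []
--
--     for row_idx in range(height):
--         result_row = []
--         for col_idx in range(width):
--             # Get the character at this position from first board
--             first_char = boards[0][row_idx][col_idx]
--
--             # Check if all boards have the same character at this position
--             is_consistent = True
--             for board in boards[1:]: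
--                 if board[row_idx][col_idx] != first_char:
--                     is_consistent = False
--                     break
--
--             if is_consistent:
--                 result_row.append(first_char)
--             else:
--                 result_row.append('#')
--
--         result.append(''.join(result_row))
--
--     return result
-- ===== SOURCE B (Python) =====
-- def find_consistent_cells(boards):
--     """Find cells that are the same across all configurations."""
--     if not boards:
--         return []
--     width = len(boards[0][0]) if boards[0] else 0
--     if width == 0:
--         return [''] * len(boards[0])
--     result = [row[:width] for row in boards[0]]
--     for board in boards[1:]:
--         result = [''.join(a if a == b else '#' for a, b in zip(row_res, row_brd))
--                   for row_res, row_brd in zip(result, board)]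
--     return result
-- ===== Notes on version B (the rewrite author's own statement) =====
-- stated objective: alternative
-- what changed: B folds the boards pairwise -- starting from the first board clipped to the grid width (with a degenerate width-0 early return), it zip-merges each further board cell-wise with a '#'-absorbing merge -- instead of A's per-cell triple loop comparing every board to the first with an early break.
-- outside the precondition, e.g. on find_consistent_cells([['ab'], ['xy'], ['a']]): A returns ['##'], B returns ['#']; on find_consistent_cells([['ab'], ['a']]): A raises IndexError, B returns ['a']
import Mathlib
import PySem

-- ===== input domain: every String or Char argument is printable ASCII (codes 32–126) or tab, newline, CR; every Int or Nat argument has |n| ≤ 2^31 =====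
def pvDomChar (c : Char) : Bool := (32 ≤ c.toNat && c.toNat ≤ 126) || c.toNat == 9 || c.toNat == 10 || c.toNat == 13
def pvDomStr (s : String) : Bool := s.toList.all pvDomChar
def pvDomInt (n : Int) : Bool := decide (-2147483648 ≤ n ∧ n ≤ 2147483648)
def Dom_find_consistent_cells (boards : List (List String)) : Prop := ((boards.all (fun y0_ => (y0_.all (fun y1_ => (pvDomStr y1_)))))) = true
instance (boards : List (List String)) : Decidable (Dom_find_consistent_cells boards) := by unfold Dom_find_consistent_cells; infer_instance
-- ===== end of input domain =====

-- B folds the boards pairwise -- the first board clipped to the grid width, then a cell-wise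
-- '#'-absorbing zip-merge with each further board -- instead of A's per-cell triple loop
-- comparing every board to the first with an early break (objective: alternative).

-- ===== PORT A =====
def find_consistent_cells (boards : List (List String)) : List String :=
  if boards.isEmpty then []
  else
    let b0 := boards.headD []
    let height := b0.length
    let width := if height > 0 then (b0.headD "").toList.length else 0
    (List.range height).map (fun row_idx =>
      String.ofList ((List.range width).map (fun col_idx =>
        let first_char := (b0.getD row_idx "").toList.getD col_idx '?'
        let is_consistent := boards.tail.all (fun board =>
          ((board.getD row_idx "").toList.getD col_idx '?') == first_char)
        if is_consistent then first_char else '#')))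

-- ===== PORT B =====
-- ''.join(a if a == b else '#' for a, b in zip(row_res, row_brd))
def pyMergeRow (ra rb : List Char) : List Char :=
  (ra.zip rb).map (fun p => if p.1 == p.2 then p.1 else '#')

def find_consistent_cells_alt (boards : List (List String)) : List String :=
  if boards.isEmpty then []
  else
    -- width = len(boards[0][0]) if boards[0] else 0
    let width := if (boards.headD []).isEmpty then 0 else ((boards.headD []).headD "").toList.length
    if width = 0 then List.replicate (boards.headD []).length ""
    else
      -- row[:width] with a nonnegative bound is List.take width (exact here)
      let init := (boards.headD []).map (fun row => String.ofList (row.toList.take width))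
      boards.tail.foldl (fun result board =>
        (result.zip board).map (fun p => String.ofList (pyMergeRow p.1.toList p.2.toList))) init

-- ===== PRECONDITION & SPEC =====
-- Pre_ excludes boards of mismatched shapes -- boards[0] has positive width and some board is
-- smaller than boards[0]'s dimensions: there A either raises IndexError or, when an earlier
-- mismatch breaks its scan before the too-small board is reached, returns a value that is an
-- accident of the early break, while B's zip truncates to the shortest board.
def Pre_find_consistent_cells (boards : List (List String)) : Prop :=
  ((boards.headD []).headD "").toList.length = 0 ∨
  ∀ b ∈ boards, (boards.headD []).length ≤ b.length ∧
    ∀ i ∈ List.range (boards.headD []).length,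
      ((boards.headD []).headD "").toList.length ≤ (b.getD i "").toList.length
instance (boards : List (List String)) : Decidable (Pre_find_consistent_cells boards) := by
  unfold Pre_find_consistent_cells; infer_instance

def pvWitness_find_consistent_cells : List (List String) := [["ab", "cd"], ["ab", "#d"]]

def Spec_find_consistent_cells (boards : List (List String)) (out : List String) : Prop := out = find_consistent_cells_alt boards
instance (boards : List (List String)) (out : List String) : Decidable (Spec_find_consistent_cells boards out) := by unfold Spec_find_consistent_cells; infer_instance

-- ===== CLAIM (what is proved, stated in full; the proofs are below) =====
def Claim_equal_find_consistent_cells : Prop := ∀ (boards : List (List String)), Dom_find_consistent_cells boards → Pre_find_consistent_cells boards → Spec_find_consistent_cells boards (find_consistent_cells boards)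

-- ===== LEMMAS AND PROOFS =====

-- the cell-wise merge of one character across the remaining boards: '#' absorbs
lemma foldl_mergeChar (a : Char) (cs : List Char) :
    cs.foldl (fun x y => if x == y then x else '#') a =
      if cs.all (· == a) then a else '#' := by
  induction cs generalizing a with
  | nil => simp
  | cons b bs ih =>
    simp only [List.foldl_cons, List.all_cons]
    by_cases hab : (a == b) = true
    · rw [if_pos hab, ih]
      have := beq_iff_eq.1 hab
      subst this
      simp
    · rw [if_neg hab, ih]
      have hba : (b == a) = false := by
        simp only [beq_eq_false_iff_ne]
        simp only [beq_iff_eq] at hab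
        exact fun h => hab h.symm
      simp [hba]

lemma zip_range_eq {α : Type} (n : Nat) (l : List α) (d : α) (h : n ≤ l.length) :
    (List.range n).zip l = (List.range n).map (fun i => (i, l.getD i d)) := by
  apply List.ext_getElem
  · simp
    omega
  · intro i h1 h2
    have hi : i < n := by simpa using h2
    have hil : i < l.length := Nat.lt_of_lt_of_le hi h
    simp [List.getElem_zip, List.getElem?_eq_getElem hil]

lemma map_eq_range_map {α β : Type} (l : List α) (f : α → β) (d : α) :
    l.map f = (List.range l.length).map (fun i => f (l.getD i d)) := by
  apply List.ext_getElem
  · simp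
  · intro i h1 h2
    have hi : i < l.length := by simpa using h1
    simp [List.getElem?_eq_getElem hi]

lemma take_eq_range_map {α : Type} (l : List α) (w : Nat) (d : α) (h : w ≤ l.length) :
    l.take w = (List.range w).map (fun i => l.getD i d) := by
  apply List.ext_getElem
  · simp
    omega
  · intro i h1 h2
    have hi : i < w := by simpa using h2
    have hil : i < l.length := Nat.lt_of_lt_of_le hi h
    simp [List.getElem?_eq_getElem hil]

-- one step of B's fold, on an accumulator of h rows of w characters
lemma step_eq (h w : Nat) (g : Nat → Nat → Char) (b : List String)
    (hb : h ≤ b.length) (hrow : ∀ i, i < h → w ≤ (b.getD i "").toList.length) :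
    (((List.range h).map (fun r => String.ofList ((List.range w).map (g r)))).zip b).map
        (fun p => String.ofList (pyMergeRow p.1.toList p.2.toList)) =
      (List.range h).map (fun r => String.ofList ((List.range w).map (fun c =>
        if g r c == (b.getD r "").toList.getD c '?' then g r c else '#'))) := by
  rw [List.zip_map_left, zip_range_eq h b "" hb, List.map_map, List.map_map]
  refine List.map_congr_left fun r hr => ?_
  have hr' := List.mem_range.1 hr
  simp only [Function.comp_def, Prod.map_apply, id]
  congr 1
  rw [String.toList_ofList]
  unfold pyMergeRow
  rw [List.zip_map_left, zip_range_eq w _ '?' (hrow r hr'), List.map_map, List.map_map]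
  exact List.map_congr_left fun c hc => by simp

-- B's whole fold, against the abstract contents g of the accumulator
lemma fold_eq (h w : Nat) (bs : List (List String)) (g : Nat → Nat → Char)
    (hbs : ∀ b ∈ bs, h ≤ b.length ∧ ∀ i, i < h → w ≤ (b.getD i "").toList.length) :
    bs.foldl (fun result board =>
        (result.zip board).map (fun p => String.ofList (pyMergeRow p.1.toList p.2.toList)))
        ((List.range h).map (fun r => String.ofList ((List.range w).map (g r)))) =
      (List.range h).map (fun r => String.ofList ((List.range w).map (fun c =>
        (bs.map (fun b => (b.getD r "").toList.getD c '?')).foldl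
          (fun x y => if x == y then x else '#') (g r c)))) := by
  induction bs generalizing g with
  | nil => simp
  | cons b bs' ih =>
    rw [List.foldl_cons,
      step_eq h w g b (hbs b (List.mem_cons_self ..)).1 (hbs b (List.mem_cons_self ..)).2,
      ih _ (fun m hm => hbs m (List.mem_cons_of_mem _ hm))]
    simp only [List.map_cons, List.foldl_cons]

-- ===== VERDICT (by name: the statement is the Claim_ definition above) =====
theorem find_consistent_cells_spec : Claim_equal_find_consistent_cells := by
  intro boards _dom pre
  unfold Spec_find_consistent_cells
  cases boards with
  | nil => rfl
  | cons b0 rest =>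
    unfold Pre_find_consistent_cells at pre
    simp only [List.headD_cons] at pre
    cases b0 with
    | nil =>
      simp [find_consistent_cells, find_consistent_cells_alt]
    | cons r0 rs =>
      simp only [List.headD_cons] at pre
      by_cases hw : r0.toList.length = 0
      · -- width 0: A emits empty rows; B returns them directly
        simp only [find_consistent_cells, find_consistent_cells_alt, List.isEmpty_cons,
          Bool.false_eq_true, if_false, List.headD_cons, List.tail_cons, List.length_cons,
          if_pos, gt_iff_lt, Nat.zero_lt_succ]
        rw [hw, if_pos rfl]
        simp [List.map_const']
      have pre' := pre.resolve_left hw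
      simp only [find_consistent_cells, find_consistent_cells_alt, List.isEmpty_cons,
        Bool.false_eq_true, if_false, List.headD_cons, List.tail_cons, List.length_cons,
        if_pos, gt_iff_lt, Nat.zero_lt_succ]
      rw [if_neg hw]
      -- bring B's initial accumulator into (range h).map form
      rw [map_eq_range_map (r0 :: rs) _ ""]
      have hinit : ∀ r ∈ List.range (r0 :: rs).length,
          String.ofList (((r0 :: rs).getD r "").toList.take r0.toList.length) =
          String.ofList ((List.range r0.toList.length).map
            (fun c => ((r0 :: rs).getD r "").toList.getD c '?')) := by
        intro r hr
        rw [take_eq_range_map _ _ '?' ((pre' _ (List.mem_cons_self ..)).2 r hr)]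
      rw [List.map_congr_left hinit]
      rw [fold_eq (r0 :: rs).length r0.toList.length rest
        (fun r c => ((r0 :: rs).getD r "").toList.getD c '?')
        (fun b hb => ⟨(pre' b (List.mem_cons_of_mem _ hb)).1,
          fun i hi => (pre' b (List.mem_cons_of_mem _ hb)).2 i (List.mem_range.2 hi)⟩)]
      refine List.map_congr_left fun r hr => ?_
      congr 1
      refine List.map_congr_left fun c hc => ?_
      rw [foldl_mergeChar, List.all_map]
      rfl
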